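-- pv_equiv track=rewrite | github.com/PanyawutS/SQA-Lab | Lab2/test_promotion.py | get_promotion
-- ===== SOURCE A (Python) =====
-- MINIMUM = 500
--
-- MIDRANGE = 700
--
-- MAXIMUM = 3500
--
-- FREE_ICECREAM = "Free ice cream cone = "
--
-- FREE_CAKE = "Free chocolate cake = "
--
-- NO_GIFT = "Thank you and see you next time"
--
-- ERROR = "Error: Invalid input"
--
-- def get_promotion(total_cost):
--     if not isinstance(total_cost, int) or total_cost < 0:
--         return ERROR
--
--     num_icecream = 0
--     num_cake = 0
--
--     if total_cost >= MINIMUM: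
--         while total_cost > 0:
--             if total_cost >= MAXIMUM:
--                 num_icecream += total_cost // MAXIMUM
--                 num_cake += total_cost // MAXIMUM
--                 total_cost %= MAXIMUM
--             elif total_cost >= MIDRANGE:
--                 num_cake += total_cost // MIDRANGE
--                 total_cost %= MIDRANGE
--             elif total_cost >= MINIMUM:
--                 num_icecream += total_cost // MINIMUM
--                 total_cost %= MINIMUM
--             else:
--                 break
--
--         if num_icecream > 0 and num_cake > 0:
--             return f"{FREE_ICECREAM}{num_icecream} and {FREE_CAKE}{num_cake}"
--         elif num_cake > 0:
--             return f"{FREE_CAKE}{num_cake}"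
--         else:
--             return f"{FREE_ICECREAM}{num_icecream}"
--     else:
--         return NO_GIFT
-- ===== SOURCE B (Python) =====
-- MINIMUM = 500
-- MIDRANGE = 700
-- MAXIMUM = 3500
-- FREE_ICECREAM = "Free ice cream cone = "
-- FREE_CAKE = "Free chocolate cake = "
-- NO_GIFT = "Thank you and see you next time"
-- ERROR = "Error: Invalid input"
--
-- def get_promotion(total_cost):
--     if not isinstance(total_cost, int) or total_cost < 0:
--         return ERROR
--     if total_cost < MINIMUM:
--         return NO_GIFT
--     # closed forms: no remainder cascade, no counter mutation
--     num_cake = total_cost // MAXIMUM + total_cost % MAXIMUM // MIDRANGE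
--     num_icecream = total_cost // MAXIMUM + total_cost % MAXIMUM % MIDRANGE // MINIMUM
--     parts = []
--     if num_icecream > 0:
--         parts.append(f"{FREE_ICECREAM}{num_icecream}")
--     if num_cake > 0:
--         parts.append(f"{FREE_CAKE}{num_cake}")
--     return " and ".join(parts)
-- ===== Notes on version B (the rewrite author's own statement) =====
-- stated objective: simpler
-- what changed: Replaces A's greedy while loop with mutating counters by two closed-form arithmetic expressions (cake = n//3500 + n%3500//700, icecream = n//3500 + n%3500%700//500) and replaces the three-branch f-string ladder by building a parts list and joining it with ' and '.
import Mathlib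
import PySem

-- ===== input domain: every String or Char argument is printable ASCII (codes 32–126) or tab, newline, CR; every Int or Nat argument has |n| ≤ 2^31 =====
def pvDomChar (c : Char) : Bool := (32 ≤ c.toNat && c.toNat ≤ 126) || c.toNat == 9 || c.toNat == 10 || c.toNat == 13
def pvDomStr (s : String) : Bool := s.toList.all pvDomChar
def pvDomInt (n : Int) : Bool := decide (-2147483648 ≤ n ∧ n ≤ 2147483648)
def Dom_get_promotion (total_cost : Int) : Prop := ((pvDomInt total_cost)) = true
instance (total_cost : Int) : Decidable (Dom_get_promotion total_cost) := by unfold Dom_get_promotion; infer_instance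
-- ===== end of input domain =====

-- B replaces A's greedy while loop and branch-ladder formatting by two closed-form
-- expressions and a join over a parts list (simpler); return values proved equal for all ints.

-- shared module constants (identical in both Pythons)
def pvMINIMUM : Int := 500
def pvMIDRANGE : Int := 700
def pvMAXIMUM : Int := 3500
def pvFREE_ICECREAM : String := "Free ice cream cone = "
def pvFREE_CAKE : String := "Free chocolate cake = "
def pvNO_GIFT : String := "Thank you and see you next time"
def pvERROR : String := "Error: Invalid input"

-- ===== PORT A =====
-- A's while loop, step for step; state (total_cost, num_icecream, num_cake)
def pvLoopA (total_cost num_icecream num_cake : Int) : Int × Int :=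
  if _h0 : total_cost > 0 then
    if _h1 : total_cost ≥ pvMAXIMUM then
      pvLoopA (PySem.Int.mod total_cost pvMAXIMUM)
        (num_icecream + PySem.Int.floordiv total_cost pvMAXIMUM)
        (num_cake + PySem.Int.floordiv total_cost pvMAXIMUM)
    else if _h2 : total_cost ≥ pvMIDRANGE then
      pvLoopA (PySem.Int.mod total_cost pvMIDRANGE)
        num_icecream (num_cake + PySem.Int.floordiv total_cost pvMIDRANGE)
    else if _h3 : total_cost ≥ pvMINIMUM then
      pvLoopA (PySem.Int.mod total_cost pvMINIMUM)
        (num_icecream + PySem.Int.floordiv total_cost pvMINIMUM) num_cake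
    else (num_icecream, num_cake)
  else (num_icecream, num_cake)
termination_by total_cost.toNat
decreasing_by
  · rw [PySem.Int.mod_eq_emod_of_pos (show (0:Int) < pvMAXIMUM by norm_num [pvMAXIMUM])]
    simp only [pvMAXIMUM] at *; omega
  · rw [PySem.Int.mod_eq_emod_of_pos (show (0:Int) < pvMIDRANGE by norm_num [pvMIDRANGE])]
    simp only [pvMIDRANGE] at *; omega
  · rw [PySem.Int.mod_eq_emod_of_pos (show (0:Int) < pvMINIMUM by norm_num [pvMINIMUM])]
    simp only [pvMINIMUM] at *; omega

-- A's final three-branch f-string block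
def pvFmtA (num_icecream num_cake : Int) : String :=
  if num_icecream > 0 ∧ num_cake > 0 then
    pvFREE_ICECREAM ++ PySem.Int.toStr num_icecream ++ " and " ++ pvFREE_CAKE ++ PySem.Int.toStr num_cake
  else if num_cake > 0 then
    pvFREE_CAKE ++ PySem.Int.toStr num_cake
  else
    pvFREE_ICECREAM ++ PySem.Int.toStr num_icecream

def get_promotion (total_cost : Int) : String :=
  -- `isinstance(total_cost, int)` is always true here (the argument is an int)
  if total_cost < 0 then pvERROR
  else if total_cost ≥ pvMINIMUM then
    let p := pvLoopA total_cost 0 0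
    pvFmtA p.1 p.2
  else pvNO_GIFT

-- ===== PORT B =====
-- Source B: closed-form counts, then a parts list joined with " and "
def get_promotion_alt (total_cost : Int) : String :=
  if total_cost < 0 then pvERROR
  else if total_cost < pvMINIMUM then pvNO_GIFT
  else
    let num_cake := PySem.Int.floordiv total_cost pvMAXIMUM
      + PySem.Int.floordiv (PySem.Int.mod total_cost pvMAXIMUM) pvMIDRANGE
    let num_icecream := PySem.Int.floordiv total_cost pvMAXIMUM
      + PySem.Int.floordiv (PySem.Int.mod (PySem.Int.mod total_cost pvMAXIMUM) pvMIDRANGE) pvMINIMUM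
    let parts : List String :=
      (if num_icecream > 0 then [pvFREE_ICECREAM ++ PySem.Int.toStr num_icecream] else [])
      ++ (if num_cake > 0 then [pvFREE_CAKE ++ PySem.Int.toStr num_cake] else [])
    PySem.Str.join " and " parts

-- ===== PRECONDITION & SPEC =====
def Spec_get_promotion (total_cost : Int) (out : String) : Prop := out = get_promotion_alt total_cost
instance (total_cost : Int) (out : String) : Decidable (Spec_get_promotion total_cost out) := by unfold Spec_get_promotion; infer_instance

-- ===== CLAIM (what is proved, stated in full; the proofs are below) =====
def Claim_equal_get_promotion : Prop := ∀ (total_cost : Int), Dom_get_promotion total_cost → Spec_get_promotion total_cost (get_promotion total_cost)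

-- ===== LEMMAS AND PROOFS =====

-- below 500 the loop does nothing (either total_cost = 0 or the break fires)
lemma pvLoopA_below500 (tc ni nc : Int) (h0 : 0 ≤ tc) (h1 : tc < 500) :
    pvLoopA tc ni nc = (ni, nc) := by
  rw [pvLoopA]
  simp only [pvMAXIMUM, pvMIDRANGE, pvMINIMUM]
  split_ifs <;> first | rfl | omega

-- 500 ≤ tc < 700: one iteration through the MINIMUM branch
lemma pvLoopA_mid (tc ni nc : Int) (h0 : 500 ≤ tc) (h1 : tc < 700) :
    pvLoopA tc ni nc = (ni + 1, nc) := by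
  rw [pvLoopA]
  simp only [pvMAXIMUM, pvMIDRANGE, pvMINIMUM]
  rw [dif_pos (by omega), dif_neg (by omega), dif_neg (by omega), dif_pos (by omega)]
  rw [PySem.Int.mod_eq_emod_of_pos (by norm_num), PySem.Int.floordiv_eq_ediv_of_pos (by norm_num)]
  rw [pvLoopA_below500 _ _ _ (by omega) (by omega)]
  congr 1; omega

-- 0 ≤ tc < 3500: at most two iterations; closed form
lemma pvLoopA_below3500 (tc ni nc : Int) (h0 : 0 ≤ tc) (h1 : tc < 3500) :
    pvLoopA tc ni nc = (ni + tc % 700 / 500, nc + tc / 700) := by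
  by_cases h7 : 700 ≤ tc
  · rw [pvLoopA]
    simp only [pvMAXIMUM, pvMIDRANGE, pvMINIMUM]
    rw [dif_pos (by omega), dif_neg (by omega), dif_pos (by omega)]
    rw [PySem.Int.mod_eq_emod_of_pos (by norm_num), PySem.Int.floordiv_eq_ediv_of_pos (by norm_num)]
    by_cases h5 : 500 ≤ tc % 700
    · rw [pvLoopA_mid _ _ _ (by omega) (by omega)]
      have : tc % 700 / 500 = 1 := by omega
      rw [this]
    · rw [pvLoopA_below500 _ _ _ (by omega) (by omega)]
      have : tc % 700 / 500 = 0 := by omega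
      rw [this]; simp
  · have hm : tc % 700 = tc := by omega
    have hd : tc / 700 = 0 := by omega
    rw [hm, hd]
    by_cases h5 : 500 ≤ tc
    · rw [pvLoopA_mid _ _ _ (by omega) (by omega)]
      have : tc / 500 = 1 := by omega
      rw [this]; simp
    · rw [pvLoopA_below500 _ _ _ (by omega) (by omega)]
      have : tc / 500 = 0 := by omega
      rw [this]; simp

-- the loop computes exactly B's closed forms
lemma pvLoopA_closed (tc : Int) (h0 : 0 ≤ tc) :
    pvLoopA tc 0 0 = (tc / 3500 + tc % 3500 % 700 / 500, tc / 3500 + tc % 3500 / 700) := by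
  by_cases h35 : 3500 ≤ tc
  · rw [pvLoopA]
    simp only [pvMAXIMUM, pvMIDRANGE, pvMINIMUM]
    rw [dif_pos (by omega), dif_pos (by omega)]
    rw [PySem.Int.mod_eq_emod_of_pos (by norm_num), PySem.Int.floordiv_eq_ediv_of_pos (by norm_num)]
    rw [pvLoopA_below3500 _ _ _ (Int.emod_nonneg tc (by norm_num)) (Int.emod_lt_of_pos tc (by norm_num))]
    simp
  · have h1 : tc % 3500 = tc := by omega
    have h2 : tc / 3500 = 0 := by omega
    rw [pvLoopA_below3500 _ _ _ h0 (by omega), h1, h2]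

-- B's join over the parts list equals A's branch ladder when not both counts are ≤ 0
lemma pvFmt_eq_join (ni nc : Int) (h : 0 < ni ∨ 0 < nc) :
    pvFmtA ni nc =
      PySem.Str.join " and "
        ((if ni > 0 then [pvFREE_ICECREAM ++ PySem.Int.toStr ni] else [])
         ++ (if nc > 0 then [pvFREE_CAKE ++ PySem.Int.toStr nc] else [])) := by
  unfold pvFmtA
  by_cases hi : ni > 0 <;> by_cases hc : nc > 0
  · simp only [hi, hc, and_self, if_true, List.singleton_append]
    simp only [PySem.Str.join, String.reduceToList, List.map_cons, List.map_nil,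
      PySem.Chars.join_cons_cons, PySem.Chars.join_singleton]
    apply String.toList_injective
    simp [pysem]
  · simp only [hi, hc, and_false, if_true, if_false, List.append_nil]
    simp only [PySem.Str.join, List.map_cons, List.map_nil, PySem.Chars.join_singleton,
      String.ofList_toList]
  · simp only [hi, hc, false_and, if_true, if_false, List.nil_append]
    simp only [PySem.Str.join, List.map_cons, List.map_nil, PySem.Chars.join_singleton,
      String.ofList_toList]
  · omega

-- ===== VERDICT (by name: the statement is the Claim_ definition above) =====
theorem get_promotion_spec : Claim_equal_get_promotion := by
  intro tc _
  unfold Spec_get_promotion get_promotion get_promotion_alt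
  by_cases hneg : tc < 0
  · simp [hneg]
  · by_cases h5 : tc ≥ pvMINIMUM
    · simp only [hneg, if_false, h5, if_true]
      rw [if_neg (by simp only [pvMINIMUM] at *; omega)]
      simp only [pvMAXIMUM, pvMIDRANGE, pvMINIMUM] at *
      rw [PySem.Int.mod_eq_emod_of_pos (by norm_num),
          PySem.Int.floordiv_eq_ediv_of_pos (by norm_num)]
      rw [PySem.Int.mod_eq_emod_of_pos (by norm_num),
          PySem.Int.floordiv_eq_ediv_of_pos (by norm_num),
          PySem.Int.floordiv_eq_ediv_of_pos (by norm_num)]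
      rw [pvLoopA_closed tc (by omega)]
      apply pvFmt_eq_join
      -- not both counts zero when tc ≥ 500
      omega
    · simp only [hneg, if_false, h5, if_false]
      rw [if_pos (by simp only [pvMINIMUM] at *; omega)]
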